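-- pv_equiv track=rewrite | github.com/boredchilada/spiderfoot-revival | spiderfoot/blueprints/fragments.py | _event_badge_color
-- ===== SOURCE A (Python) =====
-- def _event_badge_color(type_code: str) -> str:
--     """Return Tailwind CSS classes for an event type badge color."""
--     tc = type_code or ''
--
--     # Red — malicious / blacklisted / compromised
--     if 'MALICIOUS' in tc or 'BLACKLISTED' in tc or 'COMPROMISED' in tc:
--         return 'bg-red-900/40 text-red-300 border border-red-500/30'
--
--     # Orange — vulnerabilities, findings
--     if 'VULNERABILITY' in tc or 'CVE' in tc:
--         return 'bg-orange-900/40 text-orange-300 border border-orange-500/30'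
--
--     # Cyan — network / attack surface (IPs, domains, ports, hostnames)
--     if any(k in tc for k in ('IP_ADDRESS', 'INTERNET_NAME', 'DOMAIN_NAME',
--                               'TCP_PORT', 'UDP_PORT', 'NETBLOCK', 'BGP',
--                               'AFFILIATE_INTERNET', 'DNS_', 'PROVIDER_')):
--         return 'bg-cyan-900/40 text-cyan-300 border border-cyan-500/30'
--
--     # Violet — identity / people (emails, usernames, names, phones, accounts)
--     if any(k in tc for k in ('EMAIL', 'USERNAME', 'HUMAN_NAME', 'PHONE_NUMBER',
--                               'ACCOUNT_', 'SOCIAL_MEDIA')):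
--         return 'bg-violet-900/40 text-violet-300 border border-violet-500/30'
--
--     # Emerald — infrastructure / tech (web servers, SSL, software, hosting)
--     if any(k in tc for k in ('WEBSERVER', 'SSL_CERTIFICATE', 'SOFTWARE',
--                               'OPERATING_SYSTEM', 'HTTP_CODE', 'LINKED_URL',
--                               'WEB_ANALYTICS', 'CLOUD_STORAGE')):
--         return 'bg-emerald-900/40 text-emerald-300 border border-emerald-500/30'
--
--     # Amber — reputation / threat intel
--     if any(k in tc for k in ('LEAKSITE', 'DARKNET', 'DEFACED', 'RANSOMWARE')):
--         return 'bg-amber-900/40 text-amber-300 border border-amber-500/30'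
--
--     # Muted slate — raw / bulk data
--     if any(k in tc for k in ('TARGET_WEB_CONTENT', 'RAW_RIR_DATA', 'RAW_DNS',
--                               'RAW_FILE', 'ROOT', 'SEARCH_ENGINE_WEB_CONTENT')):
--         return 'bg-slate-700/40 text-slate-400 border border-slate-500/30'
--
--     # Default — neutral
--     return 'bg-slate-700/40 text-slate-400 border border-slate-500/30'
-- ===== SOURCE B (Python) =====
-- GROUPS = [
--     ('MALICIOUS', 'BLACKLISTED', 'COMPROMISED'),
--     ('VULNERABILITY', 'CVE'),
--     ('IP_ADDRESS', 'INTERNET_NAME', 'DOMAIN_NAME', 'TCP_PORT', 'UDP_PORT',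
--      'NETBLOCK', 'BGP', 'AFFILIATE_INTERNET', 'DNS_', 'PROVIDER_'),
--     ('EMAIL', 'USERNAME', 'HUMAN_NAME', 'PHONE_NUMBER', 'ACCOUNT_',
--      'SOCIAL_MEDIA'),
--     ('WEBSERVER', 'SSL_CERTIFICATE', 'SOFTWARE', 'OPERATING_SYSTEM',
--      'HTTP_CODE', 'LINKED_URL', 'WEB_ANALYTICS', 'CLOUD_STORAGE'),
--     ('LEAKSITE', 'DARKNET', 'DEFACED', 'RANSOMWARE'),
--     ('TARGET_WEB_CONTENT', 'RAW_RIR_DATA', 'RAW_DNS', 'RAW_FILE', 'ROOT',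
--      'SEARCH_ENGINE_WEB_CONTENT'),
-- ]
--
-- COLORS = [
--     'bg-red-900/40 text-red-300 border border-red-500/30',
--     'bg-orange-900/40 text-orange-300 border border-orange-500/30',
--     'bg-cyan-900/40 text-cyan-300 border border-cyan-500/30',
--     'bg-violet-900/40 text-violet-300 border border-violet-500/30',
--     'bg-emerald-900/40 text-emerald-300 border border-emerald-500/30',
--     'bg-amber-900/40 text-amber-300 border border-amber-500/30',
--     'bg-slate-700/40 text-slate-400 border border-slate-500/30',
--     'bg-slate-700/40 text-slate-400 border border-slate-500/30',  # default
-- ]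
--
-- # flat keyword -> group priority index
-- PRIORITY = {kw: i for i, kws in enumerate(GROUPS) for kw in kws}
--
--
-- def _event_badge_color(type_code: str) -> str:
--     """Return Tailwind CSS classes for an event type badge color."""
--     tc = type_code or ''
--     best = min((p for kw, p in PRIORITY.items() if kw in tc),
--                default=len(COLORS) - 1)
--     return COLORS[best]
-- ===== Notes on version B (the rewrite author's own statement) =====
-- stated objective: alternative
-- what changed: Replaced the ordered early-return branch cascade by a single flat aggregation: a keyword-to-priority dict is built once, the function computes the minimum priority among all keywords occurring in the string (default = last index) and indexes a color table with it; no grouping or early exit in the scan.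
import Mathlib
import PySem

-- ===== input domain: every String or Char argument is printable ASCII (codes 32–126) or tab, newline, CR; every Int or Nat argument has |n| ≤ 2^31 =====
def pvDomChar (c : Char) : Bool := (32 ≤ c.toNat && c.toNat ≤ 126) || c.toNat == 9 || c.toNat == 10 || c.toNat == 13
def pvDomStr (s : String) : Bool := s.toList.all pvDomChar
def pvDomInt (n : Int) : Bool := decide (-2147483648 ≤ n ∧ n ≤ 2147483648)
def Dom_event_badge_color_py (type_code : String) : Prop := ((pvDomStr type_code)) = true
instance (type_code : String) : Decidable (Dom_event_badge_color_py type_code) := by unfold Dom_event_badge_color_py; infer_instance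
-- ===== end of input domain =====

-- B replaces A's ordered early-return branch cascade by a flat keyword→priority table,
-- computes the minimum matched priority and indexes a color list (objective: alternative).

-- ===== PORT A =====
def event_badge_color_py (type_code : String) : String :=
  let tc := if type_code = "" then "" else type_code
  if PySem.Str.isIn "MALICIOUS" tc || PySem.Str.isIn "BLACKLISTED" tc || PySem.Str.isIn "COMPROMISED" tc then
    "bg-red-900/40 text-red-300 border border-red-500/30"
  else if PySem.Str.isIn "VULNERABILITY" tc || PySem.Str.isIn "CVE" tc then
    "bg-orange-900/40 text-orange-300 border border-orange-500/30"
  else if (["IP_ADDRESS", "INTERNET_NAME", "DOMAIN_NAME", "TCP_PORT", "UDP_PORT",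
            "NETBLOCK", "BGP", "AFFILIATE_INTERNET", "DNS_", "PROVIDER_"].any
            (fun k => PySem.Str.isIn k tc)) then
    "bg-cyan-900/40 text-cyan-300 border border-cyan-500/30"
  else if (["EMAIL", "USERNAME", "HUMAN_NAME", "PHONE_NUMBER", "ACCOUNT_",
            "SOCIAL_MEDIA"].any (fun k => PySem.Str.isIn k tc)) then
    "bg-violet-900/40 text-violet-300 border border-violet-500/30"
  else if (["WEBSERVER", "SSL_CERTIFICATE", "SOFTWARE", "OPERATING_SYSTEM",
            "HTTP_CODE", "LINKED_URL", "WEB_ANALYTICS", "CLOUD_STORAGE"].any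
            (fun k => PySem.Str.isIn k tc)) then
    "bg-emerald-900/40 text-emerald-300 border border-emerald-500/30"
  else if (["LEAKSITE", "DARKNET", "DEFACED", "RANSOMWARE"].any
            (fun k => PySem.Str.isIn k tc)) then
    "bg-amber-900/40 text-amber-300 border border-amber-500/30"
  else if (["TARGET_WEB_CONTENT", "RAW_RIR_DATA", "RAW_DNS", "RAW_FILE", "ROOT",
            "SEARCH_ENGINE_WEB_CONTENT"].any (fun k => PySem.Str.isIn k tc)) then
    "bg-slate-700/40 text-slate-400 border border-slate-500/30"
  else
    "bg-slate-700/40 text-slate-400 border border-slate-500/30"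

-- ===== PORT B =====
def pvGroups : List (List String) :=
  [["MALICIOUS", "BLACKLISTED", "COMPROMISED"],
   ["VULNERABILITY", "CVE"],
   ["IP_ADDRESS", "INTERNET_NAME", "DOMAIN_NAME", "TCP_PORT", "UDP_PORT",
    "NETBLOCK", "BGP", "AFFILIATE_INTERNET", "DNS_", "PROVIDER_"],
   ["EMAIL", "USERNAME", "HUMAN_NAME", "PHONE_NUMBER", "ACCOUNT_",
    "SOCIAL_MEDIA"],
   ["WEBSERVER", "SSL_CERTIFICATE", "SOFTWARE", "OPERATING_SYSTEM",
    "HTTP_CODE", "LINKED_URL", "WEB_ANALYTICS", "CLOUD_STORAGE"],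
   ["LEAKSITE", "DARKNET", "DEFACED", "RANSOMWARE"],
   ["TARGET_WEB_CONTENT", "RAW_RIR_DATA", "RAW_DNS", "RAW_FILE", "ROOT",
    "SEARCH_ENGINE_WEB_CONTENT"]]

def pvColors : List String :=
  ["bg-red-900/40 text-red-300 border border-red-500/30",
   "bg-orange-900/40 text-orange-300 border border-orange-500/30",
   "bg-cyan-900/40 text-cyan-300 border border-cyan-500/30",
   "bg-violet-900/40 text-violet-300 border border-violet-500/30",
   "bg-emerald-900/40 text-emerald-300 border border-emerald-500/30",
   "bg-amber-900/40 text-amber-300 border border-amber-500/30",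
   "bg-slate-700/40 text-slate-400 border border-slate-500/30",
   "bg-slate-700/40 text-slate-400 border border-slate-500/30"]

-- PRIORITY = {kw: i for i, kws in enumerate(GROUPS) for kw in kws}
-- (Python group indices are small Nats here; keys are distinct so the dict is the flat assoc list.)
def pvPriority : List (String × Nat) :=
  (pvGroups.zipIdx.flatMap (fun p => p.1.map (fun k => (k, p.2))))

-- min((p for kw, p in PRIORITY.items() if kw in tc), default=len(COLORS)-1), exact as a fold
def event_badge_color_py_alt (type_code : String) : String :=
  let tc := if type_code = "" then "" else type_code
  let best := pvPriority.foldl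
    (fun a kp => if PySem.Str.isIn kp.1 tc then Nat.min a kp.2 else a)
    (pvColors.length - 1)
  pvColors.getD best ""

-- ===== PRECONDITION & SPEC =====
def Spec_event_badge_color_py (type_code : String) (out : String) : Prop := out = event_badge_color_py_alt type_code
instance (type_code : String) (out : String) : Decidable (Spec_event_badge_color_py type_code out) := by unfold Spec_event_badge_color_py; infer_instance

-- ===== CLAIM (what is proved, stated in full; the proofs are below) =====
def Claim_equal_event_badge_color_py : Prop := ∀ (type_code : String), Dom_event_badge_color_py type_code → Spec_event_badge_color_py type_code (event_badge_color_py type_code)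

-- ===== LEMMAS AND PROOFS =====

-- folding the min over one group's keywords (all with the same priority p)
theorem pv_gfold (tc : String) (ks : List String) (p acc : Nat) :
    List.foldl (fun a kp => if PySem.Str.isIn kp.1 tc then Nat.min a kp.2 else a) acc
      (ks.map (fun k => (k, p)))
    = if ks.any (fun k => PySem.Str.isIn k tc) then Nat.min acc p else acc := by
  induction ks generalizing acc with
  | nil => simp
  | cons k ks ih =>
    rw [List.map_cons, List.foldl_cons, ih, List.any_cons]
    cases h : PySem.Str.isIn k tc <;>
      cases h2 : ks.any (fun k => PySem.Str.isIn k tc) <;>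
        simp only [h2, Bool.false_or, Bool.true_or, if_true, if_false,
          Bool.false_eq_true, Nat.min_assoc, Nat.min_self]

theorem pvPriority_eq :
    pvPriority =
      (["MALICIOUS", "BLACKLISTED", "COMPROMISED"].map (fun k => (k, 0))) ++
      (["VULNERABILITY", "CVE"].map (fun k => (k, 1))) ++
      (["IP_ADDRESS", "INTERNET_NAME", "DOMAIN_NAME", "TCP_PORT", "UDP_PORT",
        "NETBLOCK", "BGP", "AFFILIATE_INTERNET", "DNS_", "PROVIDER_"].map (fun k => (k, 2))) ++
      (["EMAIL", "USERNAME", "HUMAN_NAME", "PHONE_NUMBER", "ACCOUNT_",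
        "SOCIAL_MEDIA"].map (fun k => (k, 3))) ++
      (["WEBSERVER", "SSL_CERTIFICATE", "SOFTWARE", "OPERATING_SYSTEM",
        "HTTP_CODE", "LINKED_URL", "WEB_ANALYTICS", "CLOUD_STORAGE"].map (fun k => (k, 4))) ++
      (["LEAKSITE", "DARKNET", "DEFACED", "RANSOMWARE"].map (fun k => (k, 5))) ++
      (["TARGET_WEB_CONTENT", "RAW_RIR_DATA", "RAW_DNS", "RAW_FILE", "ROOT",
        "SEARCH_ENGINE_WEB_CONTENT"].map (fun k => (k, 6))) := by
  rfl

-- ===== VERDICT (by name: the statement is the Claim_ definition above) =====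
set_option maxHeartbeats 2000000 in
theorem event_badge_color_py_spec : Claim_equal_event_badge_color_py := by
  intro type_code _
  unfold Spec_event_badge_color_py event_badge_color_py event_badge_color_py_alt
  dsimp only
  generalize (if type_code = "" then "" else type_code) = tc
  rw [pvPriority_eq]
  simp only [List.foldl_append, pv_gfold, List.any_cons, List.any_nil,
    Bool.or_false, Bool.or_assoc]
  split_ifs <;> rfl
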